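-- pv_equiv track=rewrite | github.com/flex2020/algorithm | programmers/level_2/86052.py | solution
-- ===== SOURCE A (Python) =====
-- from collections import deque
--
-- def bfs(start_x, start_y, start_direction, N, M, grid, answer, visited):
--     q = deque([(start_x, start_y, start_direction, 1)])
--     visited[start_x][start_y][start_direction] = True
--
--     while q:
--         x, y, d, l = q.popleft()
--
--         nx = x + dx[d]
--         ny = y + dy[d]
--         if nx < 0:
--             nx = N - 1
--         elif nx >= N:
--             nx = 0
--         if ny < 0:
--             ny = M - 1
--         elif ny >= M:
--             ny = 0
--         nd = d
--         if grid[nx][ny] == 'L':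
--             nd = (d - 1) % 4
--         elif grid[nx][ny] == 'R':
--             nd = (d + 1) % 4
--
--         if not visited[nx][ny][nd]:
--             q.append((nx, ny, nd, l + 1))
--             visited[nx][ny][nd] = True
--         else:
--             answer.append(l)
--
-- dx = [1, 0, -1, 0]
--
-- dy = [0, -1, 0, 1]
--
-- def solution(grid):
--     answer = []
--     N, M = len(grid), len(grid[0])
--     visited = [[[False] * 4 for _ in range(M)] for _ in range(N)]
--     for i in range(N):
--         for j in range(M):
--             for k in range(4):
--                 if not visited[i][j][k]:
--                     bfs(i, j, k, N, M, grid, answer, visited)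
--     answer.sort()
--     return answer
-- ===== SOURCE B (Python) =====
-- def solution(grid):
--     N, M = len(grid), len(grid[0])
--     size = N * M * 4
--
--     def step(t):
--         # one beam move-and-turn on a packed state index x*(M*4) + y*4 + d
--         x, y, d = t // (M * 4), (t // 4) % M, t % 4
--         if d == 0:
--             x = (x + 1) % N
--         elif d == 2:
--             x = (x + N - 1) % N
--         elif d == 1:
--             y = (y + M - 1) % M
--         else:
--             y = (y + 1) % M
--         c = grid[x][y]
--         if c == 'L':
--             d = (d + 3) % 4
--         elif c == 'R':
--             d = (d + 1) % 4
--         return x * (M * 4) + y * 4 + d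
--
--     # cycle-leader scan: the step map is a permutation, so states split into
--     # cycles; each state walks its own cycle, aborting as soon as a smaller
--     # state appears, and reports the cycle length iff it is the cycle minimum.
--     # No visited structure is kept at all.
--     out = []
--     for s in range(size):
--         cur, cnt = step(s), 1
--         while cur > s:
--             cur, cnt = step(cur), cnt + 1
--         if cur == s:
--             out.append(cnt)
--     out.sort()
--     return out
-- ===== Notes on version B (the rewrite author's own statement) =====
-- stated objective: alternative
-- what changed: B drops A's global visited structure and deque entirely: it treats the beam step as a permutation on packed state indices and runs a stateless cycle-leader scan - each state walks its own cycle, aborts as soon as a smaller state index appears, and reports the cycle length exactly when it is the cycle's minimum - then sorts.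
import Mathlib
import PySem

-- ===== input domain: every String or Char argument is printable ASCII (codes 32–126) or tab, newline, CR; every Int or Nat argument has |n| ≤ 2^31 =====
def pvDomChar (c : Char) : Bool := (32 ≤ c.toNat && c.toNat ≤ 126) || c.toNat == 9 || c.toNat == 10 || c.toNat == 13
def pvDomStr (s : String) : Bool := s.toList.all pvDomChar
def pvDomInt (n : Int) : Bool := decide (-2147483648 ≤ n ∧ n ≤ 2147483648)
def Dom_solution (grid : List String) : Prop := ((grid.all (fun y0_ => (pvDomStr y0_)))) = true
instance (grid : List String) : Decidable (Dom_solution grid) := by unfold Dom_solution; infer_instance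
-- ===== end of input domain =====

-- B replaces A's visited-marking deque traversal by a stateless cycle-leader
-- scan of the beam-step permutation (each state walks its cycle, aborting at a
-- smaller state; the cycle minimum reports the length); objective: alternative.

-- ===== PORT A =====
def pvDx : List Int := [1, 0, -1, 0]
def pvDy : List Int := [0, -1, 0, 1]

-- visited[x][y][d] read / write on the nested lists; every access Python makes
-- is in range under Pre_solution, so the getD defaults are never read
def pvVGet (vis : List (List (List Bool))) (x y d : Int) : Bool :=
  ((vis.getD x.toNat []).getD y.toNat []).getD d.toNat false

def pvVSet (vis : List (List (List Bool))) (x y d : Int) : List (List (List Bool)) :=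
  vis.modify x.toNat (fun r => r.modify y.toNat (fun c => c.set d.toNat true))

-- the body lines 'nx = x + dx[d] … nd = (d + 1) % 4' of A's loop, named so the
-- loop below binds their result once (PySem.Int.mod is Python's %)
def pvNext (N M : Int) (grid : List String) (x y d : Int) : Int × Int × Int :=
  let nx0 := x + PySem.List.pyGetD pvDx d 0
  let ny0 := y + PySem.List.pyGetD pvDy d 0
  let nx := if nx0 < 0 then N - 1 else if nx0 ≥ N then 0 else nx0
  let ny := if ny0 < 0 then M - 1 else if ny0 ≥ M then 0 else ny0
  let c := (grid.getD nx.toNat "").toList.getD ny.toNat ' '  -- grid[nx][ny]; in range under Pre_solution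
  let nd := if c = 'L' then PySem.Int.mod (d - 1) 4
            else if c = 'R' then PySem.Int.mod (d + 1) 4 else d
  (nx, ny, nd)

-- A's while loop; the deque never holds more than one entry, so it is this tail
-- recursion; the fuel only makes it structural (each pass marks a fresh state,
-- so the fuel passed by pvBfs never runs out)
def pvBfsLoop (N M : Int) (grid : List String) :
    Nat → Int → Int → Int → Int → List (List (List Bool)) → List Int →
    List (List (List Bool)) × List Int
  | 0, _, _, _, _, vis, ans => (vis, ans)
  | fuel+1, x, y, d, l, vis, ans =>
    let nxt := pvNext N M grid x y d
    if ! pvVGet vis nxt.1 nxt.2.1 nxt.2.2 then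
      pvBfsLoop N M grid fuel nxt.1 nxt.2.1 nxt.2.2 (l + 1)
        (pvVSet vis nxt.1 nxt.2.1 nxt.2.2) ans
    else (vis, ans ++ [l])

def pvBfs (sx sy sd N M : Int) (grid : List String)
    (ans : List Int) (vis : List (List (List Bool))) :
    List (List (List Bool)) × List Int :=
  pvBfsLoop N M grid ((N * M * 4).toNat + 1) sx sy sd 1 (pvVSet vis sx sy sd) ans

def solution (grid : List String) : List Int :=
  let N : Int := grid.length
  let M : Int := ((grid.headD "").toList.length : Int)   -- len(grid[0]); grid ≠ [] under Pre_solution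
  let vis0 : List (List (List Bool)) :=
    List.replicate N.toNat (List.replicate M.toNat (List.replicate 4 false))
  let st := (PySem.List.pyRange 0 N 1).foldl (fun st i =>
      (PySem.List.pyRange 0 M 1).foldl (fun st j =>
        (PySem.List.pyRange 0 4 1).foldl
          (fun (st : List (List (List Bool)) × List Int) k =>
            if ! pvVGet st.1 i j k then pvBfs i j k N M grid st.2 st.1 else st)
          st) st) (vis0, ([] : List Int))
  PySem.List.sorted st.2 (fun a => a) false

-- ===== PORT B =====
-- B's helper step(t): one beam move-and-turn on a packed state index
-- x*(M*4) + y*4 + d (all values nonnegative, so Nat division is Python's //)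
def pvStep (grid : List String) (N M idx : Nat) : Nat :=
  let x := idx / (M * 4)
  let y := (idx / 4) % M
  let d := idx % 4
  let p := if d = 0 then ((x + 1) % N, y)
           else if d = 2 then ((x + N - 1) % N, y)
           else if d = 1 then (x, (y + M - 1) % M)
           else (x, (y + 1) % M)
  let c := (grid.getD p.1 "").toList.getD p.2 ' '  -- grid cell; in range under Pre_solution
  let d' := if c = 'L' then (d + 3) % 4 else if c = 'R' then (d + 1) % 4 else d
  p.1 * (M * 4) + p.2 * 4 + d'

-- B's 'while cur > s' loop; the fuel only makes it structural (the walk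
-- reaches an index ≤ s within the cycle length, which is at most size)
def pvWalkB (grid : List String) (N M s : Nat) : Nat → Nat → Nat → Nat × Nat
  | 0, cur, cnt => (cur, cnt)
  | fuel+1, cur, cnt =>
    if s < cur then pvWalkB grid N M s fuel (pvStep grid N M cur) (cnt + 1)
    else (cur, cnt)

def solution_alt (grid : List String) : List Int :=
  let N := grid.length
  let M := (grid.headD "").toList.length
  let size := N * M * 4
  let out := (List.range size).foldl
    (fun (acc : List Int) s =>
      let r := pvWalkB grid N M s size (pvStep grid N M s) 1
      if r.1 = s then acc ++ [(r.2 : Int)] else acc) []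
  PySem.List.sorted out (fun a => a) false

-- ===== PRECONDITION & SPEC =====
-- Pre_ excludes exactly the inputs on which Python A raises an IndexError: the
-- empty grid (len(grid[0])) and ragged grids with a row shorter than the first
-- one (grid[nx][ny], since every cell is eventually stepped into).
def Pre_solution (grid : List String) : Prop :=
  grid ≠ [] ∧ ∀ s ∈ grid, (grid.headD "").toList.length ≤ s.toList.length
instance (grid : List String) : Decidable (Pre_solution grid) := by
  unfold Pre_solution; infer_instance

def pvWitness_solution : List String := ["SL", "RS"]

def Spec_solution (grid : List String) (out : List Int) : Prop := out = solution_alt grid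
instance (grid : List String) (out : List Int) : Decidable (Spec_solution grid out) := by
  unfold Spec_solution; infer_instance

-- ===== CLAIM (what is proved, stated in full; the proofs are below) =====
def Claim_equal_solution : Prop :=
  ∀ (grid : List String), Dom_solution grid → Pre_solution grid → Spec_solution grid (solution grid)

-- ===== LEMMAS AND PROOFS =====

-- ---- getD through modify / set ----
theorem pv_getD_eq {α : Type} (l : List α) (j : Nat) (dflt : α) :
    l.getD j dflt = (l[j]?).getD dflt := by
  simp [List.getD]

theorem pv_getD_modify {α : Type} (l : List α) (i j : Nat) (f : α → α) (dflt : α) :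
    (l.modify i f).getD j dflt
      = if i = j then (l[j]?.map f).getD dflt else l.getD j dflt := by
  rw [pv_getD_eq, List.getElem?_modify, pv_getD_eq]
  cases h : l[j]? <;> split_ifs <;> simp

theorem pv_getD_set {α : Type} (l : List α) (i j : Nat) (a : α) (dflt : α) :
    (l.set i a).getD j dflt
      = if i = j ∧ i < l.length then a else l.getD j dflt := by
  rw [pv_getD_eq, List.getElem?_set, pv_getD_eq]
  split_ifs with h1 h2 h3 <;> simp_all <;> omega

theorem pv_getD_replicate {α : Type} (n j : Nat) (a : α) (dflt : α) (h : j < n) :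
    (List.replicate n a).getD j dflt = a := by
  rw [pv_getD_eq, List.getElem?_replicate, if_pos h]
  rfl

-- ---- packed-index arithmetic ----
theorem pv_enc_mod4 (x y d M : Nat) (hd : d < 4) : (x*(M*4) + y*4 + d) % 4 = d := by
  have h : x*(M*4) + y*4 + d = 4*(x*M + y) + d := by ring
  rw [h, Nat.mul_add_mod, Nat.mod_eq_of_lt hd]

theorem pv_enc_div4_modM (x y d M : Nat) (hy : y < M) (hd : d < 4) :
    ((x*(M*4) + y*4 + d) / 4) % M = y := by
  have h : x*(M*4) + y*4 + d = 4*(x*M + y) + d := by ring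
  rw [h, Nat.mul_add_div (by omega), Nat.div_eq_of_lt hd, Nat.add_zero]
  have h2 : x*M + y = M*x + y := by ring
  rw [h2, Nat.mul_add_mod, Nat.mod_eq_of_lt hy]

theorem pv_enc_divM4 (x y d M : Nat) (hy : y < M) (hd : d < 4) :
    (x*(M*4) + y*4 + d) / (M*4) = x := by
  have h : x*(M*4) + y*4 + d = (M*4)*x + (y*4 + d) := by ring
  rw [h, Nat.mul_add_div (by omega), Nat.div_eq_of_lt (by omega), Nat.add_zero]

theorem pv_enc_lt (x y d N M : Nat) (hx : x < N) (hy : y < M) (hd : d < 4) :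
    x*(M*4) + y*4 + d < N*M*4 := by
  have h1 : (x+1)*(M*4) = x*(M*4) + M*4 := by ring
  have h2 : (x+1)*(M*4) ≤ N*(M*4) := Nat.mul_le_mul_right _ (by omega)
  have h3 : N*(M*4) = N*M*4 := by ring
  omega

theorem pv_enc_inj (x y d x' y' d' N M : Nat) (hx : x < N) (hy : y < M) (hd : d < 4)
    (hx' : x' < N) (hy' : y' < M) (hd' : d' < 4)
    (h : x*(M*4) + y*4 + d = x'*(M*4) + y'*4 + d') : x = x' ∧ y = y' ∧ d = d' := by
  have e1 := pv_enc_mod4 x y d M hd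
  have e2 := pv_enc_div4_modM x y d M hy hd
  have e3 := pv_enc_divM4 x y d M hy hd
  have f1 := pv_enc_mod4 x' y' d' M hd'
  have f2 := pv_enc_div4_modM x' y' d' M hy' hd'
  have f3 := pv_enc_divM4 x' y' d' M hy' hd'
  rw [h] at e1 e2 e3
  omega

theorem pv_decode_encode (t M : Nat) (hM : 0 < M) :
    (t/(M*4))*(M*4) + ((t/4) % M)*4 + t % 4 = t := by
  have h1 : t = 4*(t/4) + t % 4 := (Nat.div_add_mod t 4).symm
  have h2 : t/4 = M*(t/4/M) + (t/4) % M := (Nat.div_add_mod (t/4) M).symm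
  have h3 : t/4/M = t/(M*4) := by
    rw [Nat.div_div_eq_div_mul, Nat.mul_comm 4 M]
  rw [h3] at h2
  calc (t/(M*4))*(M*4) + ((t/4) % M)*4 + t % 4
      = 4*(M*(t/(M*4)) + (t/4) % M) + t % 4 := by ring
    _ = 4*(t/4) + t % 4 := by rw [← h2]
    _ = t := h1.symm

theorem pv_dec_bounds (N M t : Nat) (ht : t < N*M*4) :
    t/(M*4) < N ∧ (t/4) % M < M ∧ t % 4 < 4 := by
  have hM : 0 < M := by
    rcases Nat.eq_zero_or_pos M with h | h
    · subst h; simp at ht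
    · exact h
  refine ⟨?_, Nat.mod_lt _ hM, Nat.mod_lt _ (by omega)⟩
  apply Nat.div_lt_of_lt_mul
  calc t < N*M*4 := ht
    _ = M*4*N := by ring

-- ---- the Nat-level step components, matching B's pvStep ----
def pvNX (N x d : Nat) : Nat :=
  if d = 0 then (x+1) % N else if d = 2 then (x+N-1) % N else x
def pvNY (M y d : Nat) : Nat :=
  if d = 1 then (y+M-1) % M else if d = 3 then (y+1) % M else y
def pvCell (grid : List String) (x y : Nat) : Char :=
  (grid.getD x "").toList.getD y ' '
def pvND (c : Char) (d : Nat) : Nat :=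
  if c = 'L' then (d+3) % 4 else if c = 'R' then (d+1) % 4 else d

theorem pv_bounds (N M x y d : Nat) (c : Char) (hx : x < N) (hy : y < M) (hd : d < 4) :
    pvNX N x d < N ∧ pvNY M y d < M ∧ pvND c d < 4 := by
  refine ⟨?_, ?_, ?_⟩ <;> simp only [pvNX, pvNY, pvND] <;>
    split_ifs <;> first | omega | exact Nat.mod_lt _ (by omega)

theorem pv_step_eq (grid : List String) (N M x y d : Nat)
    (hy : y < M) (hd : d < 4) :
    pvStep grid N M (x*(M*4) + y*4 + d)
      = (pvNX N x d)*(M*4) + (pvNY M y d)*4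
          + pvND (pvCell grid (pvNX N x d) (pvNY M y d)) d := by
  simp only [pvStep, pv_enc_divM4 x y d M hy hd, pv_enc_div4_modM x y d M hy hd,
    pv_enc_mod4 x y d M hd]
  interval_cases d <;> simp [pvNX, pvNY, pvCell, pvND]

theorem pv_nx_eq (N x d : Nat) (hx : x < N) (hd : d < 4) :
    (if ((x:Int) + PySem.List.pyGetD pvDx (d:Int) 0) < 0 then (N:Int) - 1
     else if ((x:Int) + PySem.List.pyGetD pvDx (d:Int) 0) ≥ (N:Int) then 0
     else (x:Int) + PySem.List.pyGetD pvDx (d:Int) 0) = ((pvNX N x d : Nat) : Int) := by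
  interval_cases d
  · have hdx : PySem.List.pyGetD pvDx ((0:Nat):Int) 0 = 1 := by decide
    rw [hdx, show pvNX N x 0 = (x+1) % N from rfl]
    by_cases hxe : x + 1 = N
    · rw [if_neg (by omega), if_pos (by omega), hxe, Nat.mod_self]
      simp
    · have hmod : (x + 1) % N = x + 1 := Nat.mod_eq_of_lt (by omega)
      rw [if_neg (by omega), if_neg (by omega), hmod]
      omega
  · have hdx : PySem.List.pyGetD pvDx ((1:Nat):Int) 0 = 0 := by decide
    rw [hdx, show pvNX N x 1 = x from rfl]
    rw [if_neg (by omega), if_neg (by omega)]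
    omega
  · have hdx : PySem.List.pyGetD pvDx ((2:Nat):Int) 0 = -1 := by decide
    rw [hdx, show pvNX N x 2 = (x+N-1) % N from rfl]
    by_cases hx0 : x = 0
    · rw [if_pos (by omega)]
      have hmod : (x + N - 1) % N = N - 1 := by
        have hh : x + N - 1 = N - 1 := by omega
        rw [hh]
        exact Nat.mod_eq_of_lt (by omega)
      rw [hmod]; omega
    · rw [if_neg (by omega), if_neg (by omega)]
      have h1 : x + N - 1 = (x - 1) + N := by omega
      have hmod : ((x - 1) + N) % N = x - 1 := by
        rw [Nat.add_mod_right]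
        exact Nat.mod_eq_of_lt (by omega)
      rw [h1, hmod]; omega
  · have hdx : PySem.List.pyGetD pvDx ((3:Nat):Int) 0 = 0 := by decide
    rw [hdx, show pvNX N x 3 = x from rfl]
    rw [if_neg (by omega), if_neg (by omega)]
    omega

theorem pv_ny_eq (M y d : Nat) (hy : y < M) (hd : d < 4) :
    (if ((y:Int) + PySem.List.pyGetD pvDy (d:Int) 0) < 0 then (M:Int) - 1
     else if ((y:Int) + PySem.List.pyGetD pvDy (d:Int) 0) ≥ (M:Int) then 0
     else (y:Int) + PySem.List.pyGetD pvDy (d:Int) 0) = ((pvNY M y d : Nat) : Int) := by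
  interval_cases d
  · have hdy : PySem.List.pyGetD pvDy ((0:Nat):Int) 0 = 0 := by decide
    rw [hdy, show pvNY M y 0 = y from rfl]
    rw [if_neg (by omega), if_neg (by omega)]
    omega
  · have hdy : PySem.List.pyGetD pvDy ((1:Nat):Int) 0 = -1 := by decide
    rw [hdy, show pvNY M y 1 = (y+M-1) % M from rfl]
    by_cases hy0 : y = 0
    · rw [if_pos (by omega)]
      have hmod : (y + M - 1) % M = M - 1 := by
        have hh : y + M - 1 = M - 1 := by omega
        rw [hh]
        exact Nat.mod_eq_of_lt (by omega)
      rw [hmod]; omega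
    · rw [if_neg (by omega), if_neg (by omega)]
      have h1 : y + M - 1 = (y - 1) + M := by omega
      have hmod : ((y - 1) + M) % M = y - 1 := by
        rw [Nat.add_mod_right]
        exact Nat.mod_eq_of_lt (by omega)
      rw [h1, hmod]; omega
  · have hdy : PySem.List.pyGetD pvDy ((2:Nat):Int) 0 = 0 := by decide
    rw [hdy, show pvNY M y 2 = y from rfl]
    rw [if_neg (by omega), if_neg (by omega)]
    omega
  · have hdy : PySem.List.pyGetD pvDy ((3:Nat):Int) 0 = 1 := by decide
    rw [hdy, show pvNY M y 3 = (y+1) % M from rfl]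
    by_cases hye : y + 1 = M
    · rw [if_neg (by omega), if_pos (by omega), hye, Nat.mod_self]
      simp
    · have hmod : (y + 1) % M = y + 1 := Nat.mod_eq_of_lt (by omega)
      rw [if_neg (by omega), if_neg (by omega), hmod]
      omega

theorem pv_nd_eq (c : Char) (d : Nat) (hd : d < 4) :
    (if c = 'L' then PySem.Int.mod ((d:Int) - 1) 4
     else if c = 'R' then PySem.Int.mod ((d:Int) + 1) 4 else (d:Int))
      = ((pvND c d : Nat) : Int) := by
  simp only [pvND]
  split_ifs
  · interval_cases d <;> decide
  · interval_cases d <;> decide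
  · rfl

theorem pv_next_eq (grid : List String) (N M x y d : Nat)
    (hx : x < N) (hy : y < M) (hd : d < 4) :
    pvNext (N : Int) (M : Int) grid (x : Int) (y : Int) (d : Int)
      = (((pvNX N x d : Nat) : Int), ((pvNY M y d : Nat) : Int),
         ((pvND (pvCell grid (pvNX N x d) (pvNY M y d)) d : Nat) : Int)) := by
  simp only [pvNext]
  rw [pv_nx_eq N x d hx hd, pv_ny_eq M y d hy hd]
  simp only [Int.toNat_natCast]
  exact congrArg (fun z => (((pvNX N x d : Nat) : Int), ((pvNY M y d : Nat) : Int), z))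
    (pv_nd_eq ((grid.getD (pvNX N x d) "").toList.getD (pvNY M y d) ' ') d hd)

-- ---- the step map is a permutation on [0, N*M*4) ----
theorem pv_mod_shift_inj (N x x' a : Nat) (hx : x < N) (hx' : x' < N)
    (h : (x + a) % N = (x' + a) % N) : x = x' := by
  obtain ⟨n, rfl⟩ : ∃ n, N = n + 1 := ⟨N - 1, by omega⟩
  have h2 : (x + a + a*n) % (n+1) = (x' + a + a*n) % (n+1) := by
    rw [← Nat.mod_add_mod, h, Nat.mod_add_mod]
  have e : ∀ z : Nat, z + a + a*n = z + a*(n+1) := by intro z; ring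
  rw [e, e, Nat.add_mul_mod_self_right, Nat.add_mul_mod_self_right,
    Nat.mod_eq_of_lt hx, Nat.mod_eq_of_lt hx'] at h2
  exact h2

theorem pv_nd_inj (c : Char) (d d' : Nat) (hd : d < 4) (hd' : d' < 4)
    (h : pvND c d = pvND c d') : d = d' := by
  simp only [pvND] at h
  split_ifs at h <;> omega

theorem pv_nx_inj (N x x' d : Nat) (hx : x < N) (hx' : x' < N)
    (h : pvNX N x d = pvNX N x' d) : x = x' := by
  simp only [pvNX] at h
  split_ifs at h
  · exact pv_mod_shift_inj N x x' 1 hx hx' h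
  · have h2 : (x + (N-1)) % N = (x' + (N-1)) % N := by
      rw [show x + (N-1) = x + N - 1 by omega, show x' + (N-1) = x' + N - 1 by omega]
      exact h
    exact pv_mod_shift_inj N x x' (N-1) hx hx' h2
  · exact h

theorem pv_ny_inj (M y y' d : Nat) (hy : y < M) (hy' : y' < M)
    (h : pvNY M y d = pvNY M y' d) : y = y' := by
  simp only [pvNY] at h
  split_ifs at h
  · have h2 : (y + (M-1)) % M = (y' + (M-1)) % M := by
      rw [show y + (M-1) = y + M - 1 by omega, show y' + (M-1) = y' + M - 1 by omega]
      exact h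
    exact pv_mod_shift_inj M y y' (M-1) hy hy' h2
  · exact pv_mod_shift_inj M y y' 1 hy hy' h
  · exact h

theorem pvStep_lt (grid : List String) (N M t : Nat) (ht : t < N*M*4) :
    pvStep grid N M t < N*M*4 := by
  obtain ⟨hx, hy, hd⟩ := pv_dec_bounds N M t ht
  have hM : 0 < M := by
    rcases Nat.eq_zero_or_pos M with h | h
    · subst h; simp at ht
    · exact h
  rw [show t = (t/(M*4))*(M*4) + ((t/4) % M)*4 + t % 4 from (pv_decode_encode t M hM).symm,
    pv_step_eq grid N M _ _ _ hy hd]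
  obtain ⟨b1, b2, b3⟩ := pv_bounds N M (t/(M*4)) ((t/4) % M) (t % 4)
    (pvCell grid (pvNX N (t/(M*4)) (t % 4)) (pvNY M ((t/4) % M) (t % 4))) hx hy hd
  exact pv_enc_lt _ _ _ N M b1 b2 b3

theorem pvStep_inj (grid : List String) (N M a b : Nat) (ha : a < N*M*4) (hb : b < N*M*4)
    (h : pvStep grid N M a = pvStep grid N M b) : a = b := by
  have hM : 0 < M := by
    rcases Nat.eq_zero_or_pos M with hh | hh
    · subst hh; simp at ha
    · exact hh
  obtain ⟨hax, hay, had⟩ := pv_dec_bounds N M a ha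
  obtain ⟨hbx, hby, hbd⟩ := pv_dec_bounds N M b hb
  rw [show a = (a/(M*4))*(M*4) + ((a/4) % M)*4 + a % 4 from (pv_decode_encode a M hM).symm,
    pv_step_eq grid N M _ _ _ hay had] at h
  rw [show b = (b/(M*4))*(M*4) + ((b/4) % M)*4 + b % 4 from (pv_decode_encode b M hM).symm,
    pv_step_eq grid N M _ _ _ hby hbd] at h
  obtain ⟨bx1, by1, bd1⟩ := pv_bounds N M (a/(M*4)) ((a/4) % M) (a % 4)
    (pvCell grid (pvNX N (a/(M*4)) (a % 4)) (pvNY M ((a/4) % M) (a % 4))) hax hay had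
  obtain ⟨bx2, by2, bd2⟩ := pv_bounds N M (b/(M*4)) ((b/4) % M) (b % 4)
    (pvCell grid (pvNX N (b/(M*4)) (b % 4)) (pvNY M ((b/4) % M) (b % 4))) hbx hby hbd
  obtain ⟨ex, ey, ed⟩ := pv_enc_inj _ _ _ _ _ _ N M bx1 by1 bd1 bx2 by2 bd2 h
  rw [ex, ey] at ed
  have hdd : a % 4 = b % 4 := pv_nd_inj _ _ _ had hbd ed
  rw [hdd] at ex ey
  have hxx : a/(M*4) = b/(M*4) := pv_nx_inj N _ _ _ hax hbx ex
  have hyy : (a/4) % M = (b/4) % M := pv_ny_inj M _ _ _ hay hby ey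
  calc a = (a/(M*4))*(M*4) + ((a/4) % M)*4 + a % 4 := (pv_decode_encode a M hM).symm
    _ = (b/(M*4))*(M*4) + ((b/4) % M)*4 + b % 4 := by rw [hxx, hyy, hdd]
    _ = b := pv_decode_encode b M hM

-- ---- iterates of the step map ----
def pvIt (grid : List String) (N M k s : Nat) : Nat := (pvStep grid N M)^[k] s

theorem pvIt_zero (grid : List String) (N M s : Nat) : pvIt grid N M 0 s = s := rfl

theorem pvIt_succ' (grid : List String) (N M k s : Nat) :
    pvIt grid N M (k+1) s = pvStep grid N M (pvIt grid N M k s) :=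
  Function.iterate_succ_apply' _ _ _

theorem pvIt_one (grid : List String) (N M s : Nat) :
    pvIt grid N M 1 s = pvStep grid N M s := by simp [pvIt]

theorem pvIt_lt (grid : List String) (N M k s : Nat) (hs : s < N*M*4) :
    pvIt grid N M k s < N*M*4 := by
  induction k with
  | zero => exact hs
  | succ n ih => rw [pvIt_succ']; exact pvStep_lt grid N M _ ih

theorem pvIt_add (grid : List String) (N M a b s : Nat) :
    pvIt grid N M (a + b) s = pvIt grid N M a (pvIt grid N M b s) :=
  Function.iterate_add_apply _ _ _ _

theorem pvIt_cancel (grid : List String) (N M : Nat) :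
    ∀ (a x y : Nat), x < N*M*4 → y < N*M*4 →
      pvIt grid N M a x = pvIt grid N M a y → x = y := by
  intro a
  induction a with
  | zero => intro x y _ _ h; exact h
  | succ n ih =>
    intro x y hx hy h
    rw [show n+1 = n+1 from rfl, pvIt, pvIt, Function.iterate_succ_apply,
      Function.iterate_succ_apply] at h
    have := ih (pvStep grid N M x) (pvStep grid N M y)
      (pvStep_lt grid N M x hx) (pvStep_lt grid N M y hy) h
    exact pvStep_inj grid N M x y hx hy this

theorem pvRet (grid : List String) (N M s : Nat) (hs : s < N*M*4) :
    ∃ k, 1 ≤ k ∧ k ≤ N*M*4 ∧ pvIt grid N M k s = s := by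
  obtain ⟨i, j, hne, heq⟩ := Fintype.exists_ne_map_eq_of_card_lt
    (fun i : Fin (N*M*4+1) => (⟨pvIt grid N M i s, pvIt_lt grid N M i s hs⟩ : Fin (N*M*4)))
    (by simp)
  have hval : pvIt grid N M i s = pvIt grid N M j s := congrArg Fin.val heq
  have key : ∀ (p q : Fin (N*M*4+1)), (p:Nat) < (q:Nat) →
      pvIt grid N M p s = pvIt grid N M q s → ∃ k, 1 ≤ k ∧ k ≤ N*M*4 ∧ pvIt grid N M k s = s := by
    intro p q hpq h
    refine ⟨(q:Nat) - (p:Nat), by omega, by have := q.isLt; omega, ?_⟩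
    have h2 : pvIt grid N M (p:Nat) (pvIt grid N M ((q:Nat) - (p:Nat)) s)
        = pvIt grid N M (p:Nat) s := by
      rw [← pvIt_add, show (p:Nat) + ((q:Nat) - (p:Nat)) = (q:Nat) by omega]
      exact h.symm
    exact pvIt_cancel grid N M (p:Nat) _ s
      (pvIt_lt grid N M _ s hs) hs h2
  rcases Nat.lt_trichotomy (i:Nat) (j:Nat) with h | h | h
  · exact key i j h hval
  · exact absurd (Fin.ext h) hne
  · exact key j i h hval.symm

-- ---- the cycle length pvL: first return time, by bounded linear search ----
def pvLgo (grid : List String) (N M s : Nat) : Nat → Nat → Nat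
  | 0, k => k
  | fuel+1, k => if pvIt grid N M k s = s then k else pvLgo grid N M s fuel (k+1)

def pvL (grid : List String) (N M s : Nat) : Nat := pvLgo grid N M s (N*M*4) 1

theorem pvLgo_spec (grid : List String) (N M s : Nat) :
    ∀ (fuel k : Nat), (∃ j, k ≤ j ∧ j < k + fuel ∧ pvIt grid N M j s = s) →
      k ≤ pvLgo grid N M s fuel k ∧ pvIt grid N M (pvLgo grid N M s fuel k) s = s ∧
      pvLgo grid N M s fuel k < k + fuel ∧
      ∀ j, k ≤ j → j < pvLgo grid N M s fuel k → pvIt grid N M j s ≠ s := by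
  intro fuel
  induction fuel with
  | zero => intro k h; obtain ⟨j, h1, h2, _⟩ := h; omega
  | succ f ih =>
    intro k h
    by_cases hk : pvIt grid N M k s = s
    · simp only [pvLgo, if_pos hk]
      exact ⟨le_refl _, hk, by omega, fun j hj1 hj2 => by omega⟩
    · simp only [pvLgo, if_neg hk]
      obtain ⟨j, h1, h2, h3⟩ := h
      have hjne : j ≠ k := fun e => hk (e ▸ h3)
      obtain ⟨r1, r2, r3, r4⟩ := ih (k+1) ⟨j, by omega, by omega, h3⟩
      refine ⟨by omega, r2, by omega, ?_⟩
      intro j' hj1 hj2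
      rcases Nat.eq_or_lt_of_le hj1 with he | hl
      · exact he ▸ hk
      · exact r4 j' (by omega) hj2

theorem pvL_spec (grid : List String) (N M s : Nat) (hs : s < N*M*4) :
    1 ≤ pvL grid N M s ∧ pvL grid N M s ≤ N*M*4 ∧
    pvIt grid N M (pvL grid N M s) s = s ∧
    ∀ j, 1 ≤ j → j < pvL grid N M s → pvIt grid N M j s ≠ s := by
  obtain ⟨k, hk1, hk2, hk3⟩ := pvRet grid N M s hs
  obtain ⟨r1, r2, r3, r4⟩ := pvLgo_spec grid N M s (N*M*4) 1 ⟨k, hk1, by omega, hk3⟩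
  exact ⟨r1, by unfold pvL; omega, r2, fun j h1 h2 => r4 j h1 h2⟩

theorem pvIt_mul_add (grid : List String) (N M s : Nat) (hs : s < N*M*4) :
    ∀ q r, pvIt grid N M (q * pvL grid N M s + r) s = pvIt grid N M r s := by
  intro q
  induction q with
  | zero => intro r; simp
  | succ n ih =>
    intro r
    have h : (n+1) * pvL grid N M s + r = (n * pvL grid N M s + r) + pvL grid N M s := by ring
    rw [h, pvIt_add, (pvL_spec grid N M s hs).2.2.1, ih]

theorem pvIt_mod (grid : List String) (N M s k : Nat) (hs : s < N*M*4) :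
    pvIt grid N M k s = pvIt grid N M (k % pvL grid N M s) s := by
  conv_lhs => rw [← Nat.div_add_mod k (pvL grid N M s),
    Nat.mul_comm (pvL grid N M s) (k / pvL grid N M s)]
  exact pvIt_mul_add grid N M s hs _ _

theorem pvOrbit_symm (grid : List String) (N M i k u : Nat) (hi : i < N*M*4)
    (h : pvIt grid N M k i = u) :
    ∃ k', k' < pvL grid N M u ∧ pvIt grid N M k' u = i := by
  have hu : u < N*M*4 := h ▸ pvIt_lt grid N M k i hi
  have hLu := pvL_spec grid N M u hu
  have hLi := pvL_spec grid N M i hi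
  by_cases hz : k % pvL grid N M i = 0
  · have : pvIt grid N M k i = i := by
      rw [pvIt_mod grid N M i k hi, hz]; rfl
    refine ⟨0, by omega, ?_⟩
    rw [pvIt_zero, ← h, this]
  · set Li := pvL grid N M i with hLidef
    have hmlt : k % Li < Li := Nat.mod_lt _ (by omega)
    refine ⟨(Li - k % Li) % pvL grid N M u, Nat.mod_lt _ (by omega), ?_⟩
    rw [← pvIt_mod grid N M u (Li - k % Li) hu, ← h, ← pvIt_add]
    have he : Li - k % Li + k = (k / Li + 1) * Li + 0 := by
      have := Nat.div_add_mod k Li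
      have h2 : (k / Li + 1) * Li = k / Li * Li + Li := by ring
      have h3 : Li * (k / Li) = k / Li * Li := by ring
      omega
    rw [he, pvIt_mul_add grid N M i hi, pvIt_zero]

-- ---- visited states and cycle leaders ----
def pvVisitedAt (grid : List String) (N M t u : Nat) : Prop :=
  ∃ i, i < t ∧ ∃ k, pvIt grid N M k i = u

def pvLead (grid : List String) (N M s : Nat) : Prop :=
  ∀ k, k < pvL grid N M s → 0 < k → s < pvIt grid N M k s

def pvLeadB (grid : List String) (N M s : Nat) : Bool :=
  (List.range (pvL grid N M s)).all (fun k => k == 0 || decide (s < pvIt grid N M k s))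

theorem pvLeadB_iff (grid : List String) (N M s : Nat) :
    pvLeadB grid N M s = true ↔ pvLead grid N M s := by
  simp only [pvLeadB, pvLead, List.all_eq_true, List.mem_range, Bool.or_eq_true,
    beq_iff_eq, decide_eq_true_eq]
  constructor
  · intro h k hk hk0
    rcases h k hk with h1 | h1
    · omega
    · exact h1
  · intro h k hk
    by_cases hk0 : k = 0
    · exact Or.inl hk0
    · exact Or.inr (h k hk (by omega))

theorem pvVisited_not_lead (grid : List String) (N M t : Nat) (ht : t < N*M*4)
    (h : pvVisitedAt grid N M t t) : ¬ pvLead grid N M t := by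
  obtain ⟨i, hit, k, hk⟩ := h
  intro hLead
  obtain ⟨k', hk'L, hk'⟩ := pvOrbit_symm grid N M i k t (by omega) hk
  have hk'0 : 0 < k' := by
    rcases Nat.eq_zero_or_pos k' with h0 | h0
    · rw [h0, pvIt_zero] at hk'; omega
    · exact h0
  have := hLead k' hk'L hk'0
  omega

theorem pvUnvisited_lead (grid : List String) (N M t : Nat) (ht : t < N*M*4)
    (h : ¬ pvVisitedAt grid N M t t) : pvLead grid N M t := by
  intro k hkL hk0
  have hL := pvL_spec grid N M t ht
  have hne : pvIt grid N M k t ≠ t := hL.2.2.2 k (by omega) hkL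
  rcases Nat.lt_trichotomy (pvIt grid N M k t) t with hlt | he | hgt
  · exfalso
    apply h
    refine ⟨pvIt grid N M k t, hlt, ?_⟩
    obtain ⟨k', _, hk'⟩ := pvOrbit_symm grid N M t k (pvIt grid N M k t) ht rfl
    exact ⟨k', hk'⟩
  · exact absurd he hne
  · exact hgt

theorem pvLead_orbit_unvisited (grid : List String) (N M t j : Nat) (ht : t < N*M*4)
    (hLead : pvLead grid N M t) : ¬ pvVisitedAt grid N M t (pvIt grid N M j t) := by
  rintro ⟨i, hit, k, hk⟩
  obtain ⟨k'', _, hk''⟩ := pvOrbit_symm grid N M i k (pvIt grid N M j t) (by omega) hk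
  have hti : pvIt grid N M (k'' + j) t = i := by
    rw [pvIt_add]; exact hk''
  have hr : pvIt grid N M ((k'' + j) % pvL grid N M t) t = i := by
    rw [← pvIt_mod grid N M t (k'' + j) ht]; exact hti
  have hL := pvL_spec grid N M t ht
  by_cases hz : (k'' + j) % pvL grid N M t = 0
  · rw [hz, pvIt_zero] at hr; omega
  · have h2 := hLead ((k'' + j) % pvL grid N M t) (Nat.mod_lt _ (by omega)) (by omega)
    omega

theorem pvIt_ne_of_lt (grid : List String) (N M t i j : Nat) (ht : t < N*M*4)
    (hij : i < j) (hjL : j ≤ pvL grid N M t) (hnz : ¬(i = 0 ∧ j = pvL grid N M t)) :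
    pvIt grid N M i t ≠ pvIt grid N M j t := by
  intro h
  have hL := pvL_spec grid N M t ht
  have h2 : pvIt grid N M i (pvIt grid N M (j - i) t) = pvIt grid N M i t := by
    rw [← pvIt_add, show i + (j - i) = j by omega]
    exact h.symm
  have h3 : pvIt grid N M (j - i) t = t :=
    pvIt_cancel grid N M i _ t (pvIt_lt grid N M _ t ht) ht h2
  by_cases hji : j - i < pvL grid N M t
  · exact hL.2.2.2 (j - i) (by omega) hji h3
  · exact hnz ⟨by omega, by omega⟩

-- ---- the nested visited structure: shape and marking invariant ----
def pvShape (N M : Nat) (vis : List (List (List Bool))) : Prop :=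
  vis.length = N ∧ (∀ x, x < N → (vis.getD x []).length = M) ∧
  (∀ x y, x < N → y < M → ((vis.getD x []).getD y []).length = 4)

theorem pvShape_init (N M : Nat) :
    pvShape N M (List.replicate N (List.replicate M (List.replicate 4 false))) := by
  refine ⟨by simp, ?_, ?_⟩
  · intro x hx
    rw [pv_getD_replicate _ _ _ _ hx]
    simp
  · intro x y hx hy
    rw [pv_getD_replicate _ _ _ _ hx, pv_getD_replicate _ _ _ _ hy]
    simp

theorem pvVGet_init (N M : Nat) (x y d : Nat) (hx : x < N) (hy : y < M) (hd : d < 4) :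
    pvVGet (List.replicate N (List.replicate M (List.replicate 4 false)))
      (x : Int) (y : Int) (d : Int) = false := by
  simp only [pvVGet, Int.toNat_natCast]
  rw [pv_getD_replicate _ _ _ _ hx, pv_getD_replicate _ _ _ _ hy,
    pv_getD_replicate _ _ _ _ hd]

theorem pv_vget_vset (N M : Nat) (vis : List (List (List Bool)))
    (h1 : vis.length = N) (h2 : ∀ x, x < N → (vis.getD x []).length = M)
    (h3 : ∀ x y, x < N → y < M → ((vis.getD x []).getD y []).length = 4)
    (x y d x' y' d' : Nat) (hx : x < N) (hy : y < M) (hd : d < 4)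
    (hx' : x' < N) (hy' : y' < M) (hd' : d' < 4) :
    pvVGet (pvVSet vis (x : Int) (y : Int) (d : Int)) (x' : Int) (y' : Int) (d' : Int)
      = if x' = x ∧ y' = y ∧ d' = d then true
        else pvVGet vis (x' : Int) (y' : Int) (d' : Int) := by
  simp only [pvVGet, pvVSet, Int.toNat_natCast]
  rw [pv_getD_modify]
  by_cases hxx : x = x'
  · subst hxx
    rw [if_pos rfl]
    have hvx : vis[x]? = some (vis.getD x []) := by
      rw [List.getElem?_eq_getElem (by omega), List.getD_eq_getElem _ _ (by omega)]
    rw [hvx]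
    simp only [Option.map_some, Option.getD_some]
    rw [pv_getD_modify]
    by_cases hyy : y = y'
    · subst hyy
      rw [if_pos rfl]
      have hlt : y < (vis.getD x []).length := by rw [h2 x hx]; omega
      have hvy : (vis.getD x [])[y]? = some ((vis.getD x []).getD y []) := by
        rw [List.getElem?_eq_getElem hlt, List.getD_eq_getElem _ _ hlt]
      rw [hvy]
      simp only [Option.map_some, Option.getD_some]
      rw [pv_getD_set]
      by_cases hdd : d = d'
      · subst hdd
        rw [if_pos ⟨rfl, by rw [h3 x y hx hy]; omega⟩]
        simp
      · rw [if_neg (by omega), if_neg (by omega)]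
    · rw [if_neg hyy, if_neg (by omega)]
  · rw [if_neg hxx, if_neg (by omega)]

theorem pvShape_set (N M : Nat) (vis : List (List (List Bool)))
    (hsh : pvShape N M vis) (x y d : Nat) (hx : x < N) :
    pvShape N M (pvVSet vis (x : Int) (y : Int) (d : Int)) := by
  obtain ⟨h1, h2, h3⟩ := hsh
  refine ⟨by simp [pvVSet, h1], ?_, ?_⟩
  · intro x' hx'
    simp only [pvVSet, Int.toNat_natCast]
    rw [pv_getD_modify]
    split_ifs with h
    · subst h
      have hvx : vis[x]? = some (vis.getD x []) := by
        rw [List.getElem?_eq_getElem (by omega), List.getD_eq_getElem _ _ (by omega)]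
      rw [hvx]
      simp only [Option.map_some, Option.getD_some, List.length_modify]
      exact h2 _ hx'
    · exact h2 x' hx'
  · intro x' y' hx' hy'
    simp only [pvVSet, Int.toNat_natCast]
    rw [pv_getD_modify]
    split_ifs with h
    · subst h
      have hvx : vis[x]? = some (vis.getD x []) := by
        rw [List.getElem?_eq_getElem (by omega), List.getD_eq_getElem _ _ (by omega)]
      rw [hvx]
      simp only [Option.map_some, Option.getD_some]
      rw [pv_getD_modify]
      split_ifs with hh
      · subst hh
        have hlt : y < (vis.getD x []).length := by rw [h2 x hx]; omega
        have hvy : (vis.getD x [])[y]? = some ((vis.getD x []).getD y []) := by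
          rw [List.getElem?_eq_getElem hlt, List.getD_eq_getElem _ _ hlt]
        rw [hvy]
        simp only [Option.map_some, Option.getD_some, List.length_set]
        exact h3 _ _ (by omega) (by omega)
      · exact h3 _ _ (by omega) (by omega)
    · exact h3 _ _ (by omega) (by omega)

-- the marking invariant: a state is flagged iff it lies on the cycle of an
-- already-processed start (i < t) or on the first j states of t's own walk
def pvMarked (grid : List String) (N M t j : Nat) (vis : List (List (List Bool))) : Prop :=
  ∀ x y d : Nat, x < N → y < M → d < 4 →
    (pvVGet vis (x : Int) (y : Int) (d : Int) = true ↔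
      (pvVisitedAt grid N M t (x*(M*4) + y*4 + d) ∨
       ∃ k, k < j ∧ pvIt grid N M k t = x*(M*4) + y*4 + d))

theorem pvMarked_set (grid : List String) (N M t j : Nat) (hM : 0 < M)
    (ht : t < N*M*4) (vis : List (List (List Bool))) (hsh : pvShape N M vis)
    (hm : pvMarked grid N M t j vis) :
    pvMarked grid N M t (j+1)
      (pvVSet vis ((pvIt grid N M j t / (M*4) : Nat) : Int)
        (((pvIt grid N M j t / 4) % M : Nat) : Int) ((pvIt grid N M j t % 4 : Nat) : Int)) := by
  intro x y d hx hy hd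
  obtain ⟨h1, h2, h3⟩ := hsh
  have hu : pvIt grid N M j t < N*M*4 := pvIt_lt grid N M j t ht
  obtain ⟨ha, hb, hc⟩ := pv_dec_bounds N M (pvIt grid N M j t) hu
  rw [pv_vget_vset N M vis h1 h2 h3 _ _ _ x y d ha hb hc hx hy hd]
  have henc : (pvIt grid N M j t / (M*4))*(M*4) + ((pvIt grid N M j t / 4) % M)*4
      + pvIt grid N M j t % 4 = pvIt grid N M j t := pv_decode_encode _ M hM
  constructor
  · intro h
    split_ifs at h with he
    · obtain ⟨e1, e2, e3⟩ := he
      right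
      exact ⟨j, by omega, by rw [← henc, e1, e2, e3]⟩
    · rcases (hm x y d hx hy hd).mp h with h' | ⟨k, hk, hk'⟩
      · exact Or.inl h'
      · exact Or.inr ⟨k, by omega, hk'⟩
  · intro h
    rcases h with h' | ⟨k, hk, hk'⟩
    · split_ifs with he
      · rfl
      · exact (hm x y d hx hy hd).mpr (Or.inl h')
    · by_cases hkj : k = j
      · subst hkj
        rw [if_pos ?_]
        have := pv_enc_inj _ _ _ x y d N M ha hb hc hx hy hd (by rw [henc, hk'])
        exact ⟨this.1.symm, this.2.1.symm, this.2.2.symm⟩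
      · split_ifs with he
        · rfl
        · exact (hm x y d hx hy hd).mpr (Or.inr ⟨k, by omega, hk'⟩)

-- ---- A's inner walk against the cycle structure ----
theorem pvNext_dec (grid : List String) (N M u : Nat) (hM : 0 < M) (hu : u < N*M*4) :
    pvNext (N:Int) (M:Int) grid ((u/(M*4) : Nat) : Int) (((u/4)%M : Nat):Int) ((u%4 : Nat):Int)
      = (((pvStep grid N M u /(M*4) : Nat) : Int),
         (((pvStep grid N M u /4)%M : Nat):Int), ((pvStep grid N M u %4 : Nat):Int)) := by
  obtain ⟨hx, hy, hd⟩ := pv_dec_bounds N M u hu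
  rw [pv_next_eq grid N M _ _ _ hx hy hd]
  have hs : pvStep grid N M u
      = (pvNX N (u/(M*4)) (u%4))*(M*4) + (pvNY M ((u/4)%M) (u%4))*4
        + pvND (pvCell grid (pvNX N (u/(M*4)) (u%4)) (pvNY M ((u/4)%M) (u%4))) (u%4) := by
    conv_lhs => rw [show u = (u/(M*4))*(M*4) + ((u/4)%M)*4 + u%4 from
      (pv_decode_encode u M hM).symm]
    exact pv_step_eq grid N M _ _ _ hy hd
  obtain ⟨b1, b2, b3⟩ := pv_bounds N M (u/(M*4)) ((u/4)%M) (u%4)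
    (pvCell grid (pvNX N (u/(M*4)) (u%4)) (pvNY M ((u/4)%M) (u%4))) hx hy hd
  rw [hs, pv_enc_divM4 _ _ _ M b2 b3, pv_enc_div4_modM _ _ _ M b2 b3, pv_enc_mod4 _ _ _ M b3]

theorem pvA_walk (grid : List String) (N M : Nat) (hM : 0 < M) (t : Nat)
    (ht : t < N*M*4) (hLead : pvLead grid N M t) :
    ∀ (fuel j : Nat) (vis : List (List (List Bool))) (ans : List Int),
      1 ≤ j → j ≤ pvL grid N M t → pvL grid N M t - j < fuel →
      pvShape N M vis → pvMarked grid N M t j vis →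
      ∃ vis', pvBfsLoop (N:Int) (M:Int) grid fuel
          ((pvIt grid N M (j-1) t / (M*4) : Nat) : Int)
          (((pvIt grid N M (j-1) t / 4) % M : Nat) : Int)
          ((pvIt grid N M (j-1) t % 4 : Nat) : Int)
          (j : Int) vis ans
        = (vis', ans ++ [(pvL grid N M t : Int)]) ∧ pvShape N M vis' ∧
        pvMarked grid N M t (pvL grid N M t) vis' := by
  intro fuel
  induction fuel with
  | zero => intro j vis ans _ _ hf _ _; omega
  | succ f ih =>
    intro j vis ans hj1 hjL hf hsh hm
    have hL := pvL_spec grid N M t ht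
    have hcur : pvIt grid N M (j-1) t < N*M*4 := pvIt_lt grid N M _ t ht
    have hstep : pvStep grid N M (pvIt grid N M (j-1) t) = pvIt grid N M j t := by
      rw [← pvIt_succ', show j - 1 + 1 = j by omega]
    have hnx : pvIt grid N M j t < N*M*4 := pvIt_lt grid N M j t ht
    obtain ⟨ga, gb, gc⟩ := pv_dec_bounds N M (pvIt grid N M j t) hnx
    have henc : (pvIt grid N M j t / (M*4))*(M*4) + ((pvIt grid N M j t / 4) % M)*4
        + pvIt grid N M j t % 4 = pvIt grid N M j t := pv_decode_encode _ M hM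
    have hguard := hm _ _ _ ga gb gc
    rw [henc] at hguard
    simp only [pvBfsLoop, pvNext_dec grid N M (pvIt grid N M (j-1) t) hM hcur, hstep]
    by_cases hjeq : j = pvL grid N M t
    · -- next state is t itself, already marked: append l = j = L t
      have hmarked : pvVGet vis ((pvIt grid N M j t / (M*4) : Nat) : Int)
          (((pvIt grid N M j t / 4) % M : Nat) : Int)
          ((pvIt grid N M j t % 4 : Nat) : Int) = true := by
        apply hguard.mpr
        right
        refine ⟨0, by omega, ?_⟩
        rw [pvIt_zero, hjeq, hL.2.2.1]
      rw [hmarked]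
      refine ⟨vis, by simp [hjeq], hsh, ?_⟩
      rw [← hjeq]
      exact hm
    · -- j < L t: the next state is fresh; mark it and continue
      have hjlt : j < pvL grid N M t := by omega
      have hfresh : pvVGet vis ((pvIt grid N M j t / (M*4) : Nat) : Int)
          (((pvIt grid N M j t / 4) % M : Nat) : Int)
          ((pvIt grid N M j t % 4 : Nat) : Int) = false := by
        rw [← Bool.not_eq_true, hguard]
        rintro (hv | ⟨k, hk, hk'⟩)
        · exact pvLead_orbit_unvisited grid N M t j ht hLead hv
        · exact pvIt_ne_of_lt grid N M t k j ht (by omega) (by omega)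
            (by rintro ⟨-, h⟩; omega) hk'
      rw [hfresh]
      simp only [Bool.not_false, if_pos]
      have hsh' := pvShape_set N M vis hsh (pvIt grid N M j t / (M*4))
        (pvIt grid N M j t / 4 % M) (pvIt grid N M j t % 4) ga
      have hm' := pvMarked_set grid N M t j hM ht vis hsh hm
      have hcast : (j : Int) + 1 = ((j + 1 : Nat) : Int) := by push_cast; ring
      rw [hcast]
      obtain ⟨vis', hrun, hsh'', hm''⟩ := ih (j+1)
        (pvVSet vis ((pvIt grid N M j t / (M*4) : Nat) : Int)
          (((pvIt grid N M j t / 4) % M : Nat) : Int)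
          ((pvIt grid N M j t % 4 : Nat) : Int)) ans
        (by omega) (by omega) (by omega) hsh' hm'
      rw [show j + 1 - 1 = j by omega] at hrun
      exact ⟨vis', hrun, hsh'', hm''⟩

-- ---- the three nested outer loops of A flattened over packed indices ----
def pvBodyA (grid : List String) (N M : Nat)
    (st : List (List (List Bool)) × List Int) (t : Nat) :
    List (List (List Bool)) × List Int :=
  if ! pvVGet st.1 ((t/(M*4) : Nat) : Int) (((t/4) % M : Nat) : Int) ((t % 4 : Nat) : Int)
  then pvBfs ((t/(M*4) : Nat) : Int) (((t/4) % M : Nat) : Int) ((t % 4 : Nat) : Int)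
    (N : Int) (M : Int) grid st.2 st.1
  else st

theorem pv_foldl_range_mul {σ : Type} (body : σ → Nat → σ) :
    ∀ (m : Nat) (k off : Nat) (init : σ),
    (List.range (m*k)).foldl (fun st t => body st (off + t)) init
    = (List.range m).foldl
        (fun st j => (List.range k).foldl (fun st t => body st (off + (j*k + t))) st) init := by
  intro m
  induction m with
  | zero => intro k off init; simp
  | succ n ih =>
    intro k off init
    have h1 : (n+1)*k = n*k + k := by ring
    rw [h1, List.range_add, List.foldl_append, List.foldl_map, List.range_succ,
      List.foldl_append, ih]
    simp only [List.foldl_cons, List.foldl_nil]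

theorem pv_triple_flat {σ : Type} (body : σ → Nat → σ) (Nn Mm : Nat) (init : σ) :
    (List.range (Nn*Mm*4)).foldl body init
    = (List.range Nn).foldl (fun st i =>
        (List.range Mm).foldl (fun st j =>
          (List.range 4).foldl (fun st k => body st (i*(Mm*4) + j*4 + k)) st) st) init := by
  have h0 : (List.range (Nn*Mm*4)).foldl body init
      = (List.range (Nn*(Mm*4))).foldl (fun st t => body st (0 + t)) init := by
    rw [show Nn*Mm*4 = Nn*(Mm*4) by ring]
    exact PySem.List.foldl_congr_mem _ _ _ _ (by intro acc u hu; simp)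
  rw [h0, pv_foldl_range_mul body Nn (Mm*4) 0 init]
  apply PySem.List.foldl_congr_mem
  intro acc j hj
  have hc1 : (List.range (Mm*4)).foldl (fun st t => body st (0 + (j*(Mm*4) + t))) acc
      = (List.range (Mm*4)).foldl (fun st t => body st (j*(Mm*4) + t)) acc :=
    PySem.List.foldl_congr_mem _ _ _ _ (by intro a u hu; simp)
  rw [hc1, pv_foldl_range_mul body Mm 4 (j*(Mm*4)) acc]
  apply PySem.List.foldl_congr_mem
  intro acc2 j2 hj2
  apply PySem.List.foldl_congr_mem
  intro acc3 u hu
  exact congrArg (body acc3) (by ring)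

theorem pv_solution_eq_flat (grid : List String)
    (hM : 0 < (grid.headD "").toList.length) :
    solution grid = PySem.List.sorted
      (((List.range (grid.length * (grid.headD "").toList.length * 4)).foldl
        (pvBodyA grid grid.length (grid.headD "").toList.length)
        (List.replicate grid.length
          (List.replicate (grid.headD "").toList.length (List.replicate 4 false)),
          ([] : List Int))).2)
      (fun a => a) false := by
  simp only [solution, Int.toNat_natCast]
  rw [PySem.List.pyRange_zero_natCast grid.length,
    PySem.List.pyRange_zero_natCast (grid.headD "").toList.length,
    show (4:Int) = ((4:Nat):Int) from rfl,
    PySem.List.pyRange_zero_natCast 4]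
  simp only [List.foldl_map]
  rw [pv_triple_flat (pvBodyA grid grid.length (grid.headD "").toList.length)
    grid.length (grid.headD "").toList.length]
  apply congrArg (fun l => PySem.List.sorted l (fun a => a) false)
  apply congrArg Prod.snd
  apply PySem.List.foldl_congr_mem
  intro acc i hi
  apply PySem.List.foldl_congr_mem
  intro acc2 j hj
  apply PySem.List.foldl_congr_mem
  intro acc3 k hk
  have hj' : j < (grid.headD "").toList.length := List.mem_range.mp hj
  have hk' : k < 4 := List.mem_range.mp hk
  simp only [pvBodyA, pv_enc_divM4 i j k _ hj' hk', pv_enc_div4_modM i j k _ hj' hk',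
    pv_enc_mod4 i j k _ hk']

-- ---- the common reference: cycle lengths recorded at their cycle leaders ----
def pvRef (grid : List String) (N M t : Nat) : List Int :=
  (List.range t).foldl
    (fun acc s => if pvLeadB grid N M s then acc ++ [(pvL grid N M s : Int)] else acc) []

theorem pvA_fold (grid : List String) (N M : Nat) (hM : 0 < M) :
    ∀ t, t ≤ N*M*4 →
      pvShape N M ((List.range t).foldl (pvBodyA grid N M)
        (List.replicate N (List.replicate M (List.replicate 4 false)),
          ([] : List Int))).1 ∧
      pvMarked grid N M t 0 ((List.range t).foldl (pvBodyA grid N M)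
        (List.replicate N (List.replicate M (List.replicate 4 false)),
          ([] : List Int))).1 ∧
      ((List.range t).foldl (pvBodyA grid N M)
        (List.replicate N (List.replicate M (List.replicate 4 false)),
          ([] : List Int))).2 = pvRef grid N M t := by
  intro t
  induction t with
  | zero =>
    intro _
    simp only [List.range_zero, List.foldl_nil]
    refine ⟨pvShape_init N M, ?_, rfl⟩
    intro x y d hx hy hd
    rw [pvVGet_init N M x y d hx hy hd]
    simp [pvVisitedAt]
  | succ n ih =>
    intro hn
    obtain ⟨hsh, hm, hans⟩ := ih (by omega)
    set st := (List.range n).foldl (pvBodyA grid N M)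
      (List.replicate N (List.replicate M (List.replicate 4 false)),
        ([] : List Int)) with hst
    have hnlt : n < N*M*4 := by omega
    obtain ⟨ga, gb, gc⟩ := pv_dec_bounds N M n hnlt
    have henc : (n/(M*4))*(M*4) + ((n/4) % M)*4 + n % 4 = n := pv_decode_encode n M hM
    have hguard := hm _ _ _ ga gb gc
    rw [henc] at hguard
    rw [List.range_succ, List.foldl_append, List.foldl_cons, List.foldl_nil, ← hst]
    have hrefsucc : pvRef grid N M (n+1)
        = if pvLeadB grid N M n then pvRef grid N M n ++ [(pvL grid N M n : Int)]
          else pvRef grid N M n := by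
      unfold pvRef
      rw [List.range_succ, List.foldl_append, List.foldl_cons, List.foldl_nil]
    by_cases hvis : pvVisitedAt grid N M n n
    · -- n already visited: both sides skip
      have hg : pvVGet st.1 ((n/(M*4) : Nat) : Int) (((n/4) % M : Nat) : Int)
          ((n % 4 : Nat) : Int) = true := hguard.mpr (Or.inl hvis)
      have hbody : pvBodyA grid N M st n = st := by
        unfold pvBodyA
        rw [hg]
        rfl
      rw [hbody, hrefsucc, if_neg ?later]
      case later =>
        rw [pvLeadB_iff]
        exact pvVisited_not_lead grid N M n hnlt hvis
      refine ⟨hsh, ?_, hans⟩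
      intro x y d hx hy hd
      rw [hm x y d hx hy hd]
      constructor
      · rintro (⟨i, hit, k, hk⟩ | ⟨k, hk, -⟩)
        · exact Or.inl ⟨i, by omega, k, hk⟩
        · omega
      · rintro (⟨i, hit, k, hk⟩ | ⟨k, hk, -⟩)
        · by_cases hin : i = n
          · subst hin
            obtain ⟨i₀, hi₀, k₀, hk₀⟩ := hvis
            left
            refine ⟨i₀, hi₀, k + k₀, ?_⟩
            rw [pvIt_add, hk₀, hk]
          · exact Or.inl ⟨i, by omega, k, hk⟩
        · omega
    · -- n is a fresh cycle leader: run the walk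
      have hLead : pvLead grid N M n := pvUnvisited_lead grid N M n hnlt hvis
      have hg : pvVGet st.1 ((n/(M*4) : Nat) : Int) (((n/4) % M : Nat) : Int)
          ((n % 4 : Nat) : Int) = false := by
        rw [← Bool.not_eq_true, hguard]
        rintro (h | ⟨k, hk, -⟩)
        · exact hvis h
        · omega
      have hL := pvL_spec grid N M n hnlt
      have hm1 : pvMarked grid N M n 1
          (pvVSet st.1 ((n/(M*4) : Nat) : Int) (((n/4) % M : Nat) : Int)
            ((n % 4 : Nat) : Int)) := by
        have h0 := pvMarked_set grid N M n 0 hM hnlt st.1 hsh hm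
        simpa [pvIt_zero] using h0
      obtain ⟨vis', hrun, hsh', hm'⟩ := pvA_walk grid N M hM n hnlt hLead
        ((N*M*4) + 1) 1
        (pvVSet st.1 ((n/(M*4) : Nat) : Int) (((n/4) % M : Nat) : Int)
          ((n % 4 : Nat) : Int)) st.2
        (le_refl 1) hL.1 (by omega)
        (pvShape_set N M st.1 hsh _ _ _ ga) hm1
      have hbody : pvBodyA grid N M st n = (vis', st.2 ++ [(pvL grid N M n : Int)]) := by
        unfold pvBodyA
        rw [hg]
        simp only [Bool.not_false, if_pos]
        unfold pvBfs
        have hfuel : (((N:Int) * (M:Int) * 4).toNat + 1) = N*M*4 + 1 := by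
          have h : ((N:Int) * (M:Int) * 4) = ((N*M*4 : Nat) : Int) := by push_cast; ring
          rw [h, Int.toNat_natCast]
        rw [hfuel]
        simpa [pvIt_zero] using hrun
      rw [hbody, hrefsucc, if_pos ((pvLeadB_iff grid N M n).mpr hLead)]
      refine ⟨hsh', ?_, by rw [hans]⟩
      intro x y d hx hy hd
      rw [hm' x y d hx hy hd]
      constructor
      · rintro (⟨i, hit, k, hk⟩ | ⟨k, hk, hk'⟩)
        · exact Or.inl ⟨i, by omega, k, hk⟩
        · exact Or.inl ⟨n, by omega, k, hk'⟩
      · rintro (⟨i, hit, k, hk⟩ | ⟨k, hk, -⟩)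
        · by_cases hin : i = n
          · subst hin
            right
            refine ⟨k % pvL grid N M i, Nat.mod_lt _ (by omega), ?_⟩
            rw [← pvIt_mod grid N M i k hnlt]
            exact hk
          · exact Or.inl ⟨i, by omega, k, hk⟩
        · omega

-- ---- B's cycle-leader walk against the cycle structure ----
theorem pvWalkB_spec (grid : List String) (N M s : Nat) (hs : s < N*M*4) :
    ∀ (fuel j : Nat), 1 ≤ j → j ≤ pvL grid N M s →
      (∀ i, 1 ≤ i → i < j → s < pvIt grid N M i s) → pvL grid N M s - j < fuel →
      (pvLead grid N M s ∧
        pvWalkB grid N M s fuel (pvIt grid N M j s) j = (s, pvL grid N M s)) ∨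
      (¬ pvLead grid N M s ∧ (pvWalkB grid N M s fuel (pvIt grid N M j s) j).1 < s) := by
  intro fuel
  induction fuel with
  | zero => intro j _ _ _ hf; omega
  | succ f ih =>
    intro j hj1 hjL hprev hf
    have hL := pvL_spec grid N M s hs
    by_cases hgt : s < pvIt grid N M j s
    · -- keep walking
      have hjlt : j < pvL grid N M s := by
        rcases Nat.eq_or_lt_of_le hjL with he | hl
        · exfalso; rw [he, hL.2.2.1] at hgt; omega
        · exact hl
      have hstep : pvStep grid N M (pvIt grid N M j s) = pvIt grid N M (j+1) s :=
        (pvIt_succ' grid N M j s).symm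
      simp only [pvWalkB, if_pos hgt, hstep]
      exact ih (j+1) (by omega) (by omega)
        (fun i hi1 hi2 => by
          rcases Nat.lt_or_ge i j with h | h
          · exact hprev i hi1 h
          · rw [show i = j by omega]; exact hgt)
        (by omega)
    · -- cur ≤ s: the loop exits
      simp only [pvWalkB, if_neg hgt]
      rcases Nat.lt_or_ge (pvIt grid N M j s) s with hlt | hge
      · -- a smaller state: s is not its cycle's minimum
        right
        have hjlt : j < pvL grid N M s := by
          rcases Nat.eq_or_lt_of_le hjL with he | hl
          · exfalso; rw [he, hL.2.2.1] at hlt; omega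
          · exact hl
        refine ⟨?_, hlt⟩
        intro hLead
        have := hLead j hjlt (by omega)
        omega
      · -- back at s: s is its cycle's minimum, count is the cycle length
        have heq : pvIt grid N M j s = s := by omega
        have hjL' : j = pvL grid N M s := by
          rcases Nat.eq_or_lt_of_le hjL with he | hl
          · exact he
          · exact absurd heq (hL.2.2.2 j hj1 hl)
        left
        refine ⟨?_, by rw [heq, hjL']⟩
        intro k hk hk0
        exact hprev k (by omega) (by omega)

theorem pvB_fold (grid : List String) (N M : Nat) (hM : 0 < M) :
    (List.range (N*M*4)).foldl
      (fun (acc : List Int) s =>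
        let r := pvWalkB grid N M s (N*M*4) (pvStep grid N M s) 1
        if r.1 = s then acc ++ [(r.2 : Int)] else acc) []
    = pvRef grid N M (N*M*4) := by
  unfold pvRef
  apply PySem.List.foldl_congr_mem
  intro acc s hsmem
  have hs : s < N*M*4 := List.mem_range.mp hsmem
  have hL := pvL_spec grid N M s hs
  have hit1 : pvIt grid N M 1 s = pvStep grid N M s := pvIt_one grid N M s
  have := pvWalkB_spec grid N M s hs (N*M*4) 1 (le_refl 1) hL.1
    (by intro i h1 h2; omega) (by omega)
  rw [hit1] at this
  rcases this with ⟨hLead, hwalk⟩ | ⟨hLead, hwalk⟩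
  · simp [hwalk, (pvLeadB_iff grid N M s).mpr hLead]
  · have hne : (pvWalkB grid N M s (N*M*4) (pvStep grid N M s) 1).1 ≠ s := by omega
    have hb : pvLeadB grid N M s = false := by
      rw [← Bool.not_eq_true, pvLeadB_iff]
      exact hLead
    simp [hne, hb]

theorem pv_solution_alt_eq (grid : List String) :
    solution_alt grid = PySem.List.sorted
      ((List.range (grid.length * (grid.headD "").toList.length * 4)).foldl
        (fun (acc : List Int) s =>
          let r := pvWalkB grid grid.length (grid.headD "").toList.length s
            (grid.length * (grid.headD "").toList.length * 4)
            (pvStep grid grid.length (grid.headD "").toList.length s) 1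
          if r.1 = s then acc ++ [(r.2 : Int)] else acc) [])
      (fun a => a) false := rfl

-- ===== VERDICT (by name: the statement is the Claim_ definition above) =====
theorem solution_spec : Claim_equal_solution := by
  unfold Claim_equal_solution
  intro grid _ _
  unfold Spec_solution
  by_cases hM : (grid.headD "").toList.length = 0
  · -- M = 0: there are no states, both programs return sorted []
    have hz : grid.length * (grid.headD "").toList.length * 4 = 0 := by rw [hM]; ring
    rw [pv_solution_alt_eq, hz]
    simp only [solution, Int.toNat_natCast, hM]
    rw [show ((0:Nat):Int) = (0:Int) from rfl]
    rw [show PySem.List.pyRange 0 (0:Int) 1 = [] from rfl]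
    simp only [List.foldl_nil]
    have hfix : ∀ (l : List Int) (init : List (List (List Bool)) × List Int),
        l.foldl (fun st _ => st) init = init := by
      intro l
      induction l with
      | nil => intro init; rfl
      | cons a as ihl => intro init; simp only [List.foldl_cons]; exact ihl init
    rw [hfix]
    rfl
  · have hMpos : 0 < (grid.headD "").toList.length := Nat.pos_of_ne_zero hM
    rw [pv_solution_eq_flat grid hMpos, pv_solution_alt_eq,
      pvB_fold grid grid.length (grid.headD "").toList.length hMpos,
      (pvA_fold grid grid.length (grid.headD "").toList.length hMpos
        (grid.length * (grid.headD "").toList.length * 4) (le_refl _)).2.2]
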